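-- pv_equiv track=rewrite | github.com/daniel-reich/ubiquitous-fiesta | PbucHZpWm6ZGEtqki_9.py | sliding_sum
-- ===== SOURCE A (Python) =====
-- def sliding_sum(lst, n, k):
--   position = n - 1
--   results = []
--   subarray = []
--   for item in lst[n - 1:]:
--       for x in range(n):
--           subarray.insert(0, lst[position - x])
--       if sum(subarray) == k:
--           results.append(subarray)
--       position += 1
--       subarray = []
--   return results
-- ===== SOURCE B (Python) =====
-- def sliding_sum(lst, n, k):
--     if n > len(lst):
--         return []
--     window = lst[:n]
--     s = sum(window)
--     results = [window] if s == k else []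
--     for i in range(1, len(lst) - n + 1):
--         s += lst[i + n - 1] - lst[i - 1]
--         if s == k:
--             results.append(lst[i:i + n])
--     return results
-- ===== Notes on version B (the rewrite author's own statement) =====
-- stated objective: faster
-- what changed: A rebuilds every length-n window element by element and re-sums it; B keeps one running window sum updated in O(1) per position and builds a window list only when the sum equals k.
-- outside the precondition, e.g. on sliding_sum([1, 2, 3], 0, 0): A returns [[]], B returns [[], [], [], []]; on sliding_sum([1, 2, 3], -1, 0): A returns [[], []], B raises IndexError
import Mathlib
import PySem

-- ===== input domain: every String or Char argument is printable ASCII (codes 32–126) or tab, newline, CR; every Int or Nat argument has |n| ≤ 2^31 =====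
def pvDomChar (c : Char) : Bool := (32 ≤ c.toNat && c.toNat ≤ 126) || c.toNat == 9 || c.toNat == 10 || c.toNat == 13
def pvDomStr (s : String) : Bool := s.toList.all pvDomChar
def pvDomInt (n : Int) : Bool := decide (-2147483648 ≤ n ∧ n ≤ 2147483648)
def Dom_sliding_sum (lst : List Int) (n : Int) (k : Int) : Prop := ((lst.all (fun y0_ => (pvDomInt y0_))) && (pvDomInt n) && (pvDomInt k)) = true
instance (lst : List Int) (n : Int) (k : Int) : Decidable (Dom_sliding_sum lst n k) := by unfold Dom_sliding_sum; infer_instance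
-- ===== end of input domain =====

-- B replaces A's per-position window rebuild and re-summation by a single running sliding-window
-- sum, building a window list only for positions whose sum equals k (measured much faster).

-- ===== PORT A =====
-- literal transliteration of A: position counter, inner loop inserting lst[position - x] at the
-- front of subarray, append on sum == k.  On Pre_ (1 ≤ n) the index position - x is always in
-- range, so Python's IndexError is unreachable and the defaulted pyGetD read is exact.
def sliding_sum (lst : List Int) (n : Int) (k : Int) : List (List Int) :=
  ((PySem.List.slice lst (some (n - 1)) none).foldl
    (fun (st : Int × List (List Int)) _item =>
      let subarray := (PySem.List.pyRange 0 n 1).foldl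
        (fun sub x => PySem.List.insert sub 0 (PySem.List.pyGetD lst (st.1 - x) 0)) []
      let results := if subarray.sum = k then st.2 ++ [subarray] else st.2
      (st.1 + 1, results))
    (n - 1, ([] : List (List Int)))).2

-- ===== PORT B =====
-- literal transliteration of Source B: early return when n > len(lst), one initial window and sum,
-- then a running sum updated per index (pyGetD reads are in range on Pre_, as above)
def sliding_sum_alt (lst : List Int) (n : Int) (k : Int) : List (List Int) :=
  if (lst.length : Int) < n then []
  else
    let window := PySem.List.slice lst none (some n)
    let s0 := window.sum
    let res0 : List (List Int) := if s0 = k then [window] else []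
    ((PySem.List.pyRange 1 ((lst.length : Int) - n + 1) 1).foldl
      (fun (st : Int × List (List Int)) i =>
        let s := st.1 + PySem.List.pyGetD lst (i + n - 1) 0 - PySem.List.pyGetD lst (i - 1) 0
        let res := if s = k then st.2 ++ [PySem.List.slice lst (some i) (some (i + n))] else st.2
        (s, res))
      (s0, res0)).2

-- ===== PRECONDITION & SPEC =====
-- Pre_ excludes n ≤ 0: a window size below 1 is an unspecified corner on which A's value
-- (a list of empty windows produced by negative-index slicing) is accidental.
def Pre_sliding_sum (lst : List Int) (n : Int) (k : Int) : Prop := 1 ≤ n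
instance (lst : List Int) (n : Int) (k : Int) : Decidable (Pre_sliding_sum lst n k) := by unfold Pre_sliding_sum; infer_instance
def pvWitness_sliding_sum : List Int × Int × Int := ([1, 2, 3, 0, 5], 2, 5)

def Spec_sliding_sum (lst : List Int) (n : Int) (k : Int) (out : List (List Int)) : Prop := out = sliding_sum_alt lst n k
instance (lst : List Int) (n : Int) (k : Int) (out : List (List Int)) : Decidable (Spec_sliding_sum lst n k out) := by unfold Spec_sliding_sum; infer_instance

-- ===== CLAIM (what is proved, stated in full; the proofs are below) =====
def Claim_equal_sliding_sum : Prop := ∀ (lst : List Int) (n : Int) (k : Int), Dom_sliding_sum lst n k → Pre_sliding_sum lst n k → Spec_sliding_sum lst n k (sliding_sum lst n k)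

-- ===== LEMMAS AND PROOFS =====

-- the window of length m starting at position j (defaulted reads; in range wherever used)
def pvWin (lst : List Int) (j m : Nat) : List Int :=
  (List.range m).map (fun t => lst.getD (j + t) 0)

-- reference value both ports are reduced to: windows in position order, kept iff their sum is k
def pvRef (lst : List Int) (m : Nat) (k : Int) : List (List Int) :=
  (List.range (lst.length + 1 - m)).filterMap
    (fun j => if (pvWin lst j m).sum = k then some (pvWin lst j m) else none)

-- A's loop body (definitionally the lambda inside sliding_sum)
def pvStepA (lst : List Int) (n k : Int) (st : Int × List (List Int)) (_item : Int) :
    Int × List (List Int) :=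
  let subarray := (PySem.List.pyRange 0 n 1).foldl
    (fun sub x => PySem.List.insert sub 0 (PySem.List.pyGetD lst (st.1 - x) 0)) []
  let results := if subarray.sum = k then st.2 ++ [subarray] else st.2
  (st.1 + 1, results)

-- B's loop body (definitionally the lambda inside sliding_sum_alt)
def pvStepB (lst : List Int) (n k : Int) (st : Int × List (List Int)) (i : Int) :
    Int × List (List Int) :=
  let s := st.1 + PySem.List.pyGetD lst (i + n - 1) 0 - PySem.List.pyGetD lst (i - 1) 0
  let res := if s = k then st.2 ++ [PySem.List.slice lst (some i) (some (i + n))] else st.2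
  (s, res)

theorem pvFoldl_cons_map (l : List Nat) (f : Nat → Int) (acc : List Int) :
    l.foldl (fun s t => f t :: s) acc = (l.map f).reverse ++ acc := by
  induction l generalizing acc with
  | nil => simp
  | cons x t ih => simp [ih]

-- A's inner loop builds exactly the window of length m starting at j (position = j + m - 1)
theorem pvInnerA (lst : List Int) (m j : Nat) (hm : 1 ≤ m) :
    (PySem.List.pyRange 0 (m : Int) 1).foldl
      (fun sub x => PySem.List.insert sub 0 (PySem.List.pyGetD lst ((j + m - 1 : Nat) - x) 0)) []
      = pvWin lst j m := by
  rw [PySem.List.pyRange_one]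
  simp only [sub_zero, Int.toNat_natCast, List.foldl_map, PySem.List.insert_zero]
  have h1 : ∀ (acc : List Int), ∀ t ∈ List.range m,
      PySem.List.pyGetD lst ((j + m - 1 : Nat) - (0 + (t:Int))) 0 :: acc
        = lst.getD (j + m - 1 - t) 0 :: acc := by
    intro acc t ht
    rw [List.mem_range] at ht
    have : ((j + m - 1 : Nat) : Int) - (0 + (t:Int)) = ((j + m - 1 - t : Nat) : Int) := by
      push_cast [Nat.sub_sub]; omega
    rw [this, PySem.List.pyGetD_natCast]
  rw [PySem.List.foldl_congr_mem (List.range m)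
        (fun x y => PySem.List.pyGetD lst ((j + m - 1 : Nat) - (0 + (y:Int))) 0 :: x)
        (fun s t => lst.getD (j + m - 1 - t) 0 :: s) [] h1,
      pvFoldl_cons_map (List.range m) (fun t => lst.getD (j + m - 1 - t) 0)]
  apply List.ext_getElem
  · simp [pvWin]
  · intro i h1 h2
    have him : i < m := by simpa [pvWin] using h2
    simp [pvWin, List.getElem_reverse]
    congr 2
    omega

-- A's outer loop, generalized over the starting position and accumulator
theorem pvOuterA (lst : List Int) (m : Nat) (k : Int) (hm : 1 ≤ m) :
    ∀ (ys : List Int) (q : Nat) (acc : List (List Int)),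
      (ys.foldl (pvStepA lst (m : Int) k) (((q + m - 1 : Nat) : Int), acc)).2
      = acc ++ (List.range ys.length).filterMap
          (fun t => if (pvWin lst (q + t) m).sum = k then some (pvWin lst (q + t) m) else none) := by
  intro ys
  induction ys with
  | nil => simp
  | cons y t ih =>
    intro q acc
    have hpos : ((q + m - 1 : Nat) : Int) + 1 = ((q + 1 + m - 1 : Nat) : Int) := by omega
    have hstep : pvStepA lst (m : Int) k (((q + m - 1 : Nat) : Int), acc) y
        = (((q + 1 + m - 1 : Nat) : Int),
            if (pvWin lst q m).sum = k then acc ++ [pvWin lst q m] else acc) := by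
      unfold pvStepA
      rw [show ((((q + m - 1 : Nat) : Int), acc).1 : Int) = ((q + m - 1 : Nat) : Int) from rfl]
      rw [pvInnerA lst m q hm, hpos]
    rw [List.foldl_cons, hstep, ih (q + 1)]
    rw [List.length_cons, List.range_succ_eq_map, List.filterMap_cons, List.filterMap_map]
    have hcomp : ∀ x ∈ List.range t.length,
        ((fun t' => if (pvWin lst (q + t') m).sum = k then some (pvWin lst (q + t') m) else none)
            ∘ (fun i => i + 1)) x
        = (fun t' => if (pvWin lst (q + 1 + t') m).sum = k then some (pvWin lst (q + 1 + t') m) else none) x := by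
      intro x _
      simp only [Function.comp_apply]
      rw [show q + (x + 1) = q + 1 + x from by omega]
    rw [List.filterMap_congr hcomp]
    simp only [Nat.add_zero]
    split <;> simp

theorem pvA_eq_ref (lst : List Int) (n k : Int) (hn : 1 ≤ n) :
    sliding_sum lst n k = pvRef lst n.toNat k := by
  obtain ⟨m, rfl⟩ : ∃ m : Nat, n = (m : Int) := ⟨n.toNat, (Int.toNat_of_nonneg (by omega)).symm⟩
  have hm : 1 ≤ m := by exact_mod_cast hn
  show ((PySem.List.slice lst (some ((m : Int) - 1)) none).foldl
      (pvStepA lst (m : Int) k) ((m : Int) - 1, ([] : List (List Int)))).2 = _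
  rw [PySem.List.slice_from lst (by omega : (0:Int) ≤ (m : Int) - 1)]
  rw [show ((m : Int) - 1 : Int) = ((0 + m - 1 : Nat) : Int) from by omega]
  rw [pvOuterA lst m k hm (lst.drop (((0 + m - 1 : Nat) : Int)).toNat) 0 []]
  simp only [List.nil_append, List.length_drop, Nat.zero_add, pvRef, Int.toNat_natCast]
  rw [show lst.length - (m - 1) = lst.length + 1 - m from by omega]

theorem pvWin_cons (lst : List Int) (j m : Nat) :
    pvWin lst j (m + 1) = lst.getD j 0 :: pvWin lst (j + 1) m := by
  simp [pvWin, List.range_succ_eq_map, List.map_map, Function.comp_def]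
  intro a _
  congr 2
  omega

theorem pvWin_snoc (lst : List Int) (j m : Nat) :
    pvWin lst j (m + 1) = pvWin lst j m ++ [lst.getD (j + m) 0] := by
  simp [pvWin, List.range_succ]

-- the running-sum update: dropping the left element and adding the next one shifts the window
theorem pvWin_sum_shift (lst : List Int) (j m : Nat) (hm : 1 ≤ m) :
    (pvWin lst j m).sum + lst.getD (j + m) 0 - lst.getD j 0 = (pvWin lst (j + 1) m).sum := by
  obtain ⟨m', rfl⟩ : ∃ m', m = m' + 1 := ⟨m - 1, by omega⟩
  rw [pvWin_cons, pvWin_snoc]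
  simp
  rw [show j + (m' + 1) = j + 1 + m' from by omega]
  ring

theorem pvTake_eq_win (lst : List Int) (m : Nat) (h : m ≤ lst.length) :
    lst.take m = pvWin lst 0 m := by
  apply List.ext_getElem
  · simp [pvWin]; omega
  · intro i h1 h2
    have : i < m := by simpa [pvWin] using h2
    simp [pvWin, List.getElem_take]
    rw [List.getElem?_eq_getElem (by omega : i < lst.length)]
    rfl

theorem pvSlice_eq_win (lst : List Int) (j m : Nat) (h : j + m ≤ lst.length) :
    PySem.List.slice lst (some (j : Int)) (some ((j : Int) + (m : Int))) = pvWin lst j m := by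
  rw [PySem.List.slice_natCast_add]
  apply List.ext_getElem
  · simp [pvWin]; omega
  · intro i h1 h2
    have : i < m := by simpa [pvWin] using h2
    simp [pvWin, List.getElem_take, List.getElem_drop]
    rw [List.getElem?_eq_getElem (by omega : j + i < lst.length)]
    rfl

-- B's loop, generalized over the starting index and accumulator
theorem pvLoopB (lst : List Int) (m : Nat) (k : Int) (hm : 1 ≤ m) :
    ∀ (c q : Nat) (acc : List (List Int)), q + c + m ≤ lst.length →
      ((List.range c).foldl
          (fun st (t : Nat) => pvStepB lst (m : Int) k st ((q : Int) + 1 + (t : Int)))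
          ((pvWin lst q m).sum, acc)).2
      = acc ++ (List.range c).filterMap
          (fun t => if (pvWin lst (q + 1 + t) m).sum = k then some (pvWin lst (q + 1 + t) m) else none) := by
  intro c
  induction c with
  | zero => simp
  | succ c ih =>
    intro q acc hlen
    rw [List.range_succ_eq_map, List.foldl_cons]
    have hstep : pvStepB lst (m : Int) k ((pvWin lst q m).sum, acc) ((q : Int) + 1 + ((0:Nat) : Int))
        = ((pvWin lst (q + 1) m).sum,
            if (pvWin lst (q + 1) m).sum = k then acc ++ [pvWin lst (q + 1) m] else acc) := by
      unfold pvStepB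
      rw [show ((q : Int) + 1 + ((0:Nat) : Int) + (m : Int) - 1 : Int) = ((q + m : Nat) : Int) from by
            push_cast; ring]
      rw [show ((q : Int) + 1 + ((0:Nat) : Int) - 1 : Int) = ((q : Nat) : Int) from by push_cast; ring]
      rw [show ((q : Int) + 1 + ((0:Nat) : Int) : Int) = (((q + 1 : Nat) : Nat) : Int) from by
            push_cast; ring]
      rw [show (((q + 1 : Nat) : Int) + (m : Int) : Int) = (((q + 1 : Nat) : Int) + ((m : Nat) : Int)) from rfl]
      rw [PySem.List.pyGetD_natCast, PySem.List.pyGetD_natCast]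
      rw [pvSlice_eq_win lst (q + 1) m (by omega)]
      rw [pvWin_sum_shift lst q m hm]
    rw [hstep, List.foldl_map]
    simp only [Nat.succ_eq_add_one]
    have hcong : ∀ (st : Int × List (List Int)), ∀ t ∈ List.range c,
        pvStepB lst (m : Int) k st ((q : Int) + 1 + ((t + 1 : Nat) : Int))
        = pvStepB lst (m : Int) k st (((q + 1 : Nat) : Int) + 1 + (t : Int)) := by
      intro st t _
      congr 1
      push_cast
      ring
    rw [PySem.List.foldl_congr_mem (List.range c) _ _ _ hcong]
    rw [ih (q + 1) _ (by omega)]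
    rw [List.filterMap_cons, List.filterMap_map]
    have hcomp : ∀ x ∈ List.range c,
        ((fun t => if (pvWin lst (q + 1 + t) m).sum = k then some (pvWin lst (q + 1 + t) m) else none)
            ∘ Nat.succ) x
        = (fun t => if (pvWin lst (q + 1 + 1 + t) m).sum = k then some (pvWin lst (q + 1 + 1 + t) m) else none) x := by
      intro x _
      simp only [Function.comp_apply, Nat.succ_eq_add_one]
      rw [show q + 1 + (x + 1) = q + 1 + 1 + x from by omega]
    rw [List.filterMap_congr hcomp]
    simp only [Nat.add_zero]
    split <;> simp

theorem pvB_eq_ref (lst : List Int) (n k : Int) (hn : 1 ≤ n) :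
    sliding_sum_alt lst n k = pvRef lst n.toNat k := by
  obtain ⟨m, rfl⟩ : ∃ m : Nat, n = (m : Int) := ⟨n.toNat, (Int.toNat_of_nonneg (by omega)).symm⟩
  have hm : 1 ≤ m := by exact_mod_cast hn
  rw [show sliding_sum_alt lst (m : Int) k
      = (if (lst.length : Int) < (m : Int) then []
         else ((PySem.List.pyRange 1 ((lst.length : Int) - (m : Int) + 1) 1).foldl
            (pvStepB lst (m : Int) k)
            ((PySem.List.slice lst none (some (m : Int))).sum,
              if (PySem.List.slice lst none (some (m : Int))).sum = k
              then [PySem.List.slice lst none (some (m : Int))] else [])).2) from rfl]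
  by_cases hlt : (lst.length : Int) < (m : Int)
  · rw [if_pos hlt]
    have : lst.length + 1 - m = 0 := by omega
    simp [pvRef, this]
  · rw [if_neg hlt]
    have hml : m ≤ lst.length := by omega
    rw [PySem.List.slice_to_natCast, pvTake_eq_win lst m hml]
    rw [PySem.List.pyRange_one]
    rw [show (((lst.length : Int) - (m : Int) + 1 - 1 : Int)).toNat = lst.length - m from by omega]
    rw [List.foldl_map]
    have hcong : ∀ (st : Int × List (List Int)), ∀ t ∈ List.range (lst.length - m),
        pvStepB lst (m : Int) k st ((1 : Int) + (t : Int))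
        = pvStepB lst (m : Int) k st (((0 : Nat) : Int) + 1 + (t : Int)) := by
      intro st t _
      norm_num
    rw [PySem.List.foldl_congr_mem (List.range (lst.length - m)) _ _ _ hcong]
    rw [pvLoopB lst m k hm (lst.length - m) 0 _ (by omega)]
    unfold pvRef
    rw [Int.toNat_natCast]
    rw [show lst.length + 1 - m = (lst.length - m) + 1 from by omega]
    rw [List.range_succ_eq_map, List.filterMap_cons, List.filterMap_map]
    have hcomp : ∀ x ∈ List.range (lst.length - m),
        ((fun j => if (pvWin lst j m).sum = k then some (pvWin lst j m) else none) ∘ Nat.succ) x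
        = (fun t => if (pvWin lst (0 + 1 + t) m).sum = k then some (pvWin lst (0 + 1 + t) m) else none) x := by
      intro x _
      simp only [Function.comp_apply, Nat.succ_eq_add_one]
      rw [show x + 1 = 0 + 1 + x from by omega]
    rw [List.filterMap_congr hcomp]
    split <;> simp

-- ===== VERDICT (by name: the statement is the Claim_ definition above) =====
theorem sliding_sum_spec : Claim_equal_sliding_sum := by
  intro lst n k _ hpre
  unfold Spec_sliding_sum
  rw [pvA_eq_ref lst n k hpre, pvB_eq_ref lst n k hpre]
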